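-- pv_equiv track=rewrite | github.com/AnveshAnnepaga/AI_DS | day 3/alloccurancesofastring - Copy.py | allocc
-- ===== SOURCE A (Python) =====
-- def allocc(s):
--     counts = {}
--     for i in s:
--         if i in counts:
--             counts[i] += 1
--         else:
--             counts[i] = 1
--
--     max_count = max(counts.values())
--     min_count = min(counts.values())
--     return min_count, max_count, counts
-- ===== SOURCE B (Python) =====
-- def allocc(s):
--     counts = {c: s.count(c) for c in dict.fromkeys(s)}
--     vals = list(counts.values())
--     return min(vals), max(vals), counts
-- ===== Notes on version B (the rewrite author's own statement) =====
-- stated objective: faster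
-- what changed: Replaces the single accumulating dict pass with a comprehension over the unique characters (dict.fromkeys order) that counts each one with a fresh s.count scan, moving the inner counting into C-level str.count.
import Mathlib
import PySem

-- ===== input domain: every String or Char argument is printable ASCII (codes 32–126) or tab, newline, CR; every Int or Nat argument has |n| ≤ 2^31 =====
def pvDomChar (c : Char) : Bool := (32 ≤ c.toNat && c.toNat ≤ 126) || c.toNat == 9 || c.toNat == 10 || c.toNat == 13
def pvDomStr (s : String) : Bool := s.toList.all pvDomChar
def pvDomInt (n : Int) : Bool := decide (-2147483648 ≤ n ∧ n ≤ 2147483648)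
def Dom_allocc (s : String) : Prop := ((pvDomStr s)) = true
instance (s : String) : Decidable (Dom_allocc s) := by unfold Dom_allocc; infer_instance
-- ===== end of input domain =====

-- B builds the counts dict by scanning s once per distinct character instead of A's single accumulating pass; same values, same order.

-- ===== PORT A =====
-- A: one pass building counts, then max/min over the values.
def allocc (s : String) : Int × Int × (List (String × Int)) :=
  let counts : PySem.Dict String Int :=
    s.toList.foldl (fun d c =>
      if d.contains c.toString then d.insert c.toString (d.getD c.toString 0 + 1)
      else d.insert c.toString 1) PySem.Dict.empty
  match PySem.List.max? counts.values (fun v => v), PySem.List.min? counts.values (fun v => v) with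
  | some mx, some mn => (mn, mx, counts.items)
  | _, _ => (0, 0, [])   -- unreachable under Pre_allocc (Python raises ValueError on empty s)

-- ===== PORT B =====
-- B: comprehension over the distinct characters in first-appearance order, each counted by s.count.
def allocc_alt (s : String) : Int × Int × (List (String × Int)) :=
  let cs := s.toList
  let counts : List (String × Int) :=
    (PySem.Set.ofList cs).map (fun c => (c.toString, (cs.count c : Int)))
  let vals := counts.map (·.2)
  match PySem.List.min? vals (fun v => v) with
  | none => (0, 0, [])   -- unreachable under Pre_allocc
  | some mn =>
    match PySem.List.max? vals (fun v => v) with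
    | none => (0, 0, [])   -- unreachable under Pre_allocc
    | some mx => (mn, mx, counts)

-- ===== PRECONDITION & SPEC =====
-- Pre_ excludes only the empty string, on which A's max() (and B's min()) raise ValueError.
def Pre_allocc (s : String) : Prop := s ≠ ""
instance (s : String) : Decidable (Pre_allocc s) := by unfold Pre_allocc; infer_instance
def pvWitness_allocc : String := "abca"

def Spec_allocc (s : String) (out : Int × Int × (List (String × Int))) : Prop := out = allocc_alt s
instance (s : String) (out : Int × Int × (List (String × Int))) : Decidable (Spec_allocc s out) := by unfold Spec_allocc; infer_instance

-- ===== CLAIM (what is proved, stated in full; the proofs are below) =====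
def Claim_equal_allocc : Prop := ∀ (s : String), Dom_allocc s → Pre_allocc s → Spec_allocc s (allocc s)

-- ===== LEMMAS AND PROOFS =====

theorem singleton_inj {a b : Char} (h : String.singleton a = String.singleton b) : a = b := by
  have := congrArg String.toList h; simpa using this

theorem discard_map_toString (s : List Char) (x : Char) :
    (PySem.Set.discard s x).map Char.toString = PySem.Set.discard (s.map Char.toString) x.toString := by
  induction s with
  | nil => rfl
  | cons a t ih =>
    simp only [PySem.Set.discard, List.filter_cons, List.map_cons] at *
    by_cases h : a = x
    · subst h; simp [ih]
    · have h' : a.toString ≠ x.toString := fun he => h (singleton_inj he)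
      simp only [Char.toString] at h' ⊢
      simp [h, h', ih]

theorem ofList_map_toString (cs : List Char) :
    PySem.Set.ofList (cs.map Char.toString) = (PySem.Set.ofList cs).map Char.toString := by
  induction cs with
  | nil => rfl
  | cons a t ih =>
    simp only [List.map_cons, PySem.Set.ofList_cons, ih, discard_map_toString]

theorem count_map_toString (cs : List Char) (c : Char) :
    (cs.map Char.toString).count c.toString = cs.count c := by
  apply List.count_map_of_injective
  intro a b h
  exact singleton_inj h

theorem step_eq (d : PySem.Dict String Int) (c : Char) :
    (if d.contains c.toString then d.insert c.toString (d.getD c.toString 0 + 1)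
     else d.insert c.toString 1) = d.insert c.toString (d.getD c.toString 0 + 1) := by
  by_cases h : d.contains c.toString = true
  · simp only [h, if_true]
  · have h0 : d.getD c.toString 0 = 0 :=
      PySem.Dict.getD_of_not_contains d 0 (by simpa using h)
    simp only [h, h0]
    norm_num

theorem counts_eq (s : String) :
    (s.toList.foldl (fun d c =>
      if d.contains c.toString then d.insert c.toString (d.getD c.toString 0 + 1)
      else d.insert c.toString 1) PySem.Dict.empty).items
    = (PySem.Set.ofList s.toList).map (fun c => (c.toString, (s.toList.count c : Int))) := by
  have hstep : (fun (d : PySem.Dict String Int) (c : Char) =>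
      if d.contains c.toString then d.insert c.toString (d.getD c.toString 0 + 1)
      else d.insert c.toString 1)
      = fun d c => d.insert c.toString (d.getD c.toString 0 + 1) := by
    funext d c; exact step_eq d c
  rw [hstep]
  have h2 : s.toList.foldl (fun (d : PySem.Dict String Int) c => d.insert c.toString (d.getD c.toString 0 + 1)) PySem.Dict.empty
      = (s.toList.map Char.toString).foldl (fun d k => d.insert k (d.getD k 0 + 1)) PySem.Dict.empty := by
    rw [List.foldl_map]
  rw [h2, PySem.Dict.foldl_insert_getD_add_one_eq_counter, PySem.Dict.items_counter,
    ofList_map_toString, List.map_map]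
  apply List.map_congr_left
  intro c _
  have := count_map_toString s.toList c
  simp only [Function.comp, this]

-- ===== VERDICT (by name: the statement is the Claim_ definition above) =====
theorem allocc_spec : Claim_equal_allocc := by
  intro s _ hpre
  unfold Spec_allocc allocc allocc_alt
  simp only [counts_eq, PySem.Dict.values]
  have hcs : s.toList ≠ [] := by
    intro h
    exact hpre (by
      have := congrArg String.ofList h
      simpa using this)
  have hne : ((PySem.Set.ofList s.toList).map
      (fun c => (c.toString, (s.toList.count c : Int)))).map (·.2) ≠ [] := by
    simp only [ne_eq, List.map_eq_nil_iff]
    intro h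
    have : s.toList = [] := by
      cases hcs' : s.toList with
      | nil => rfl
      | cons a t =>
        exfalso
        have ha : a ∈ PySem.Set.ofList s.toList := by
          rw [PySem.Set.mem_ofList, hcs']; exact List.mem_cons_self
        rw [h] at ha; exact (List.not_mem_nil) ha
    exact hcs this
  cases hmin : PySem.List.min? (((PySem.Set.ofList s.toList).map
      (fun c => (c.toString, (s.toList.count c : Int)))).map (·.2)) (fun v => v) with
  | none => exact absurd ((PySem.List.min?_eq_none_iff _ _).mp hmin) hne
  | some mn =>
    cases hmax : PySem.List.max? (((PySem.Set.ofList s.toList).map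
        (fun c => (c.toString, (s.toList.count c : Int)))).map (·.2)) (fun v => v) with
    | none => exact absurd ((PySem.List.max?_eq_none_iff _ _).mp hmax) hne
    | some mx => simp
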